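-- pv_equiv track=rewrite | github.com/wjdqlsdlsp/coding_test_practice | programmers_Dec/check_outwall.py | solution
-- ===== SOURCE A (Python) =====
-- from itertools import permutations
--
-- def solution(n, weak, dist):
--     arr = [weak[i:] + [*map(lambda x : x + n, weak[:i])] for i in range(len(weak))]
--     for i in range(1,len(dist)+1):
--         can_permutations = [*permutations(dist,i)]
--         for j in arr:
--             for t in can_permutations:
--                 now_value = j[0]
--                 for co in t:
--                     for tmp in j[1:]:
--                         if now_value + co < tmp:
--                             break
--                     else:
--                         return i
--                     now_value = tmp
--     return -1
-- ===== SOURCE B (Python) =====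
-- def dfs(tail, now, avail, depth):
--     """Can some ordering of at most `depth` friends from `avail` cover everything?"""
--     if depth == 0:
--         return False
--     for k, co in enumerate(avail):
--         nxt = next((tmp for tmp in tail if now + co < tmp), None)
--         if nxt is None:
--             return True
--         if depth > 1 and dfs(tail, nxt, avail[:k] + avail[k + 1:], depth - 1):
--             return True
--     return False
--
--
-- def solution(n, weak, dist):
--     W = len(weak)
--     doubled = weak + [x + n for x in weak]
--     for i in range(1, len(dist) + 1):
--         for s in range(W):
--             rot = doubled[s:s + W]
--             if dfs(rot[1:], rot[0], dist, i):
--                 return i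
--     return -1
-- ===== Notes on version B (the rewrite author's own statement) =====
-- stated objective: alternative
-- what changed: Replaces A's per-round materialisation of all itertools i-permutations (rebuilt and fully scanned for every rotation) with a depth-limited backtracking search over friend choices that shares permutation prefixes and returns on the first success.
import Mathlib
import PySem

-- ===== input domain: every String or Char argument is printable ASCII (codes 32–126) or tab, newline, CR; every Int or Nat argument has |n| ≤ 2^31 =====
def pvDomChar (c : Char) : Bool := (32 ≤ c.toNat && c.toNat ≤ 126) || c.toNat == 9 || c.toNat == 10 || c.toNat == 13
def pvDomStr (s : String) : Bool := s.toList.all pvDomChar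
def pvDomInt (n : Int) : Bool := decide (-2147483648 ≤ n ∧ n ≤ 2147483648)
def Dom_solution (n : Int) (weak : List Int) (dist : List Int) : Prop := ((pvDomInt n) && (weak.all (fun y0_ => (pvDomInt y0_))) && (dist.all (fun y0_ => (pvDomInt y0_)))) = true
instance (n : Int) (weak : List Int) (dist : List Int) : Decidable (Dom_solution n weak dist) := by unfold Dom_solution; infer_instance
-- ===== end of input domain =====

-- B replaces A's materialised itertools i-permutation lists (rebuilt per round and scanned in full)
-- by a backtracking depth-limited search that shares permutation prefixes and exits early (objective: alternative).

-- ===== PORT A =====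
-- each element of xs paired with the remaining elements, in order (used to enumerate permutations)
def pvPicks : List Int → List (Int × List Int)
  | [] => []
  | x :: rest => (x, rest) :: (pvPicks rest).map (fun p => (p.1, x :: p.2))

-- itertools.permutations(pool, r), index-lexicographic order
def pvPermsA (pool : List Int) : Nat → List (List Int)
  | 0 => [[]]
  | r + 1 => (pvPicks pool).flatMap (fun p => (pvPermsA p.2 r).map (fun t => p.1 :: t))

-- A's inner 'for co in t: for tmp in j[1:] … else: return i; now_value = tmp'
def pvRunA (now : Int) (tail : List Int) : List Int → Bool
  | [] => false
  | co :: rest =>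
    match tail.find? (fun tmp => decide (now + co < tmp)) with
    | none => true
    | some tmp => pvRunA tmp tail rest

-- 'for i in …: if …: return i' / final 'return -1'
def pvFirstHit : List Int → (Int → Bool) → Int
  | [], _ => -1
  | i :: is, p => if p i then i else pvFirstHit is p

def solution (n : Int) (weak : List Int) (dist : List Int) : Int :=
  pvFirstHit (PySem.List.pyRange 1 (dist.length + 1) 1) (fun i =>
    ((PySem.List.pyRange 0 weak.length 1).map (fun k =>
        PySem.List.slice weak (some k) none ++ (PySem.List.slice weak none (some k)).map (fun x => x + n))).any
      (fun j => (pvPermsA dist i.toNat).any (fun t =>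
        pvRunA (j.headD 0) (PySem.List.slice j (some 1) none) t)))

-- ===== PORT B =====
-- backtracking: can ≤ depth friends from avail, in some order, cover everything?
def pvDfsB (tail : List Int) (now : Int) (avail : List Int) : Nat → Bool
  | 0 => false
  | d + 1 => (PySem.List.enumerate avail 0).any (fun kc =>
      match tail.find? (fun tmp => decide (now + kc.2 < tmp)) with
      | none => true
      | some nxt => decide (0 < d) &&
          pvDfsB tail nxt (PySem.List.slice avail none (some kc.1) ++ PySem.List.slice avail (some (kc.1 + 1)) none) d)

-- rot = doubled[s : s + W]
def pvRotB (n : Int) (weak : List Int) (s : Int) : List Int :=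
  PySem.List.slice (weak ++ weak.map (fun x => x + n)) (some s) (some (s + weak.length))

def solution_alt (n : Int) (weak : List Int) (dist : List Int) : Int :=
  pvFirstHit (PySem.List.pyRange 1 (dist.length + 1) 1) (fun i =>
    (PySem.List.pyRange 0 weak.length 1).any (fun s =>
      pvDfsB (PySem.List.slice (pvRotB n weak s) (some 1) none) ((pvRotB n weak s).headD 0) dist i.toNat))

-- ===== PRECONDITION & SPEC =====
def Spec_solution (n : Int) (weak : List Int) (dist : List Int) (out : Int) : Prop := out = solution_alt n weak dist
instance (n : Int) (weak : List Int) (dist : List Int) (out : Int) : Decidable (Spec_solution n weak dist out) := by unfold Spec_solution; infer_instance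

-- ===== CLAIM (what is proved, stated in full; the proofs are below) =====
def Claim_equal_solution : Prop := ∀ (n : Int) (weak : List Int) (dist : List Int), Dom_solution n weak dist → Spec_solution n weak dist (solution n weak dist)

-- ===== LEMMAS AND PROOFS =====

theorem pv_any_congr_mem {α : Type} (l : List α) (f g : α → Bool)
    (h : ∀ x ∈ l, f x = g x) : l.any f = l.any g := by
  induction l with
  | nil => rfl
  | cons x xs ih =>
    simp only [List.any_cons, h x (List.mem_cons_self), ih (fun y hy => h y (List.mem_cons_of_mem _ hy))]

theorem pv_firstHit_congr (l : List Int) (p q : Int → Bool)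
    (h : ∀ x ∈ l, p x = q x) : pvFirstHit l p = pvFirstHit l q := by
  induction l with
  | nil => rfl
  | cons x xs ih =>
    simp only [pvFirstHit, h x (List.mem_cons_self)]
    split <;> [rfl; exact ih (fun y hy => h y (List.mem_cons_of_mem _ hy))]

theorem pv_length_of_mem_picks (xs : List Int) (p : Int × List Int)
    (h : p ∈ pvPicks xs) : p.2.length + 1 = xs.length := by
  induction xs generalizing p with
  | nil => simp [pvPicks] at h
  | cons x rest ih =>
    simp only [pvPicks, List.mem_cons, List.mem_map] at h
    rcases h with h | ⟨q, hq, rfl⟩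
    · subst h; simp
    · have := ih q hq; simp [List.length_cons]; omega

theorem pv_perms_exists (r : Nat) (pool : List Int) (h : r ≤ pool.length) :
    ∃ t, t ∈ pvPermsA pool r := by
  induction r generalizing pool with
  | zero => exact ⟨[], by simp [pvPermsA]⟩
  | succ r ih =>
    cases pool with
    | nil => simp at h
    | cons x rest =>
      obtain ⟨t, ht⟩ := ih rest (by simpa using Nat.lt_succ_iff.mp (Nat.lt_of_lt_of_le (Nat.lt_succ_self r) h))
      exact ⟨x :: t, by
        simp only [pvPermsA, List.mem_flatMap]
        exact ⟨(x, rest), by simp [pvPicks], List.mem_map.mpr ⟨t, ht, rfl⟩⟩⟩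

theorem pv_enumerate_shift (xs : List Int) : ∀ (a : Int),
    PySem.List.enumerate xs (a + 1) = (PySem.List.enumerate xs a).map (fun kc => (kc.1 + 1, kc.2)) := by
  induction xs with
  | nil => intro a; simp [PySem.List.enumerate_nil]
  | cons x rest ih =>
    intro a
    rw [PySem.List.enumerate_cons, PySem.List.enumerate_cons, ih (a + 1)]
    simp

theorem pv_enumerate_one (xs : List Int) :
    PySem.List.enumerate xs 1 = (PySem.List.enumerate xs 0).map (fun kc => (kc.1 + 1, kc.2)) := by
  simpa using pv_enumerate_shift xs 0

theorem pv_picks_enum : ∀ (xs : List Int),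
    (PySem.List.enumerate xs 0).map (fun kc =>
        (kc.2, PySem.List.slice xs none (some kc.1) ++ PySem.List.slice xs (some (kc.1 + 1)) none))
      = pvPicks xs := by
  intro xs
  induction xs with
  | nil => simp [PySem.List.enumerate_nil, pvPicks]
  | cons x rest ih =>
    rw [PySem.List.enumerate_cons, pvPicks]
    norm_num
    rw [pv_enumerate_one rest]
    simp only [List.map_map]
    constructor
    · have e1 : PySem.List.slice (x :: rest) none (some (0 : Int)) = [] := by
        rw [show ((0:Int)) = ((0:Nat):Int) by norm_num, PySem.List.slice_to_natCast]; simp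
      have e2 : PySem.List.slice (x :: rest) (some (1:Int)) none = rest := by
        rw [show ((1:Int)) = ((1:Nat):Int) by norm_num, PySem.List.slice_from_natCast]; simp
      rw [e1, e2]; simp
    · rw [← ih, List.map_map]
      refine List.map_congr_left (fun kc hkc => ?_)
      obtain ⟨k, hk, rfl⟩ := (PySem.List.mem_enumerate_iff _ _ _).mp hkc
      simp only [Function.comp_def]
      have c1 : (0 : Int) + (k : Int) + 1 = (((k + 1 : Nat)) : Int) := by omega
      have c2 : (0 : Int) + (k : Int) = ((k : Nat) : Int) := by omega
      rw [c1, c2, PySem.List.slice_to_natCast, PySem.List.slice_to_natCast,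
        PySem.List.slice_from_natCast]
      have c4 : (((k + 1 : Nat)) : Int) + 1 = (((k + 2 : Nat)) : Int) := by omega
      rw [c4, PySem.List.slice_from_natCast]
      simp [List.take_succ_cons, List.drop_succ_cons]

theorem pv_dfs_guard (tail : List Int) (now : Int) (avail : List Int) (r : Nat) :
    (decide (0 < r) && pvDfsB tail now avail r) = pvDfsB tail now avail r := by
  cases r with
  | zero => simp [pvDfsB]
  | succ d => simp

theorem pv_perms_any_eq_dfs (tail : List Int) (r : Nat) :
    ∀ (pool : List Int) (now : Int), r ≤ pool.length →
      (pvPermsA pool r).any (fun t => pvRunA now tail t) = pvDfsB tail now pool r := by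
  induction r with
  | zero => intro pool now _; simp [pvPermsA, pvRunA, pvDfsB]
  | succ r ih =>
    intro pool now hr
    simp only [pvPermsA, pvDfsB, List.any_flatMap, List.any_map]
    rw [← pv_picks_enum pool, List.any_map] at *
    refine pv_any_congr_mem _ _ _ (fun kc hkc => ?_)
    set p : Int × List Int := (kc.2, PySem.List.slice pool none (some kc.1) ++ PySem.List.slice pool (some (kc.1 + 1)) none) with hp
    have hpmem : p ∈ pvPicks pool := by
      rw [← pv_picks_enum pool]; exact List.mem_map.mpr ⟨kc, hkc, rfl⟩
    have hlen : r ≤ p.2.length := by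
      have := pv_length_of_mem_picks pool p hpmem; omega
    simp only [Function.comp_def]
    simp only [pvRunA]
    cases hfind : tail.find? (fun tmp => decide (now + kc.2 < tmp)) with
    | none =>
      obtain ⟨t, ht⟩ := pv_perms_exists r p.2 hlen
      exact List.any_eq_true.mpr ⟨t, ht, rfl⟩
    | some nxt =>
      show ((pvPermsA p.2 r).any (fun t => pvRunA nxt tail t))
          = (decide (0 < r) && pvDfsB tail nxt p.2 r)
      rw [pv_dfs_guard]
      exact ih p.2 nxt hlen

theorem pv_rot_eq (n : Int) (weak : List Int) (s : Int) (h0 : 0 ≤ s) (hW : s < (weak.length : Int)) :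
    PySem.List.slice weak (some s) none ++ (PySem.List.slice weak none (some s)).map (fun x => x + n)
      = PySem.List.slice (weak ++ weak.map (fun x => x + n)) (some s) (some (s + weak.length)) := by
  have hs : s = ((s.toNat : Nat) : Int) := by omega
  rw [hs, PySem.List.slice_from_natCast, PySem.List.slice_to_natCast]
  have : ((s.toNat : Nat) : Int) + (weak.length : Int) = (((s.toNat + weak.length : Nat) : Nat) : Int) := by omega
  rw [this, PySem.List.slice_natCast]
  have hk : s.toNat ≤ weak.length := by omega
  rw [List.drop_append_of_le_length hk, List.take_append]
  have h1 : s.toNat + weak.length - s.toNat = weak.length := by omega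
  have h2 : (List.drop s.toNat weak).length = weak.length - s.toNat := by simp
  have h3 : List.take weak.length (List.drop s.toNat weak) = List.drop s.toNat weak :=
    List.take_of_length_le (by simp)
  have h4 : weak.length - (weak.length - s.toNat) = s.toNat := by omega
  rw [h1, h2, h3, h4, ← List.map_take]

theorem pv_check_eq (n : Int) (weak : List Int) (dist : List Int) (i : Int)
    (hi : i.toNat ≤ dist.length) :
    ((PySem.List.pyRange 0 (weak.length : Int) 1).map (fun k =>
        PySem.List.slice weak (some k) none ++ (PySem.List.slice weak none (some k)).map (fun x => x + n))).any
      (fun j => (pvPermsA dist i.toNat).any (fun t =>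
        pvRunA (j.headD 0) (PySem.List.slice j (some 1) none) t))
    = (PySem.List.pyRange 0 (weak.length : Int) 1).any (fun s =>
        pvDfsB (PySem.List.slice (pvRotB n weak s) (some 1) none) ((pvRotB n weak s).headD 0) dist i.toNat) := by
  rw [List.any_map]
  refine pv_any_congr_mem _ _ _ (fun s hs => ?_)
  obtain ⟨h0, hW⟩ := (PySem.List.mem_pyRange_one).mp hs
  simp only [Function.comp_def, pvRotB]
  rw [pv_rot_eq n weak s h0 hW]
  exact pv_perms_any_eq_dfs _ _ _ _ hi

-- ===== VERDICT (by name: the statement is the Claim_ definition above) =====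
theorem solution_spec : Claim_equal_solution := by
  intro n weak dist _
  unfold Spec_solution solution solution_alt
  refine pv_firstHit_congr _ _ _ (fun i hi => ?_)
  obtain ⟨h1, h2⟩ := (PySem.List.mem_pyRange_one).mp hi
  exact pv_check_eq n weak dist i (by omega)
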